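-- pv_equiv track=rewrite | github.com/mattmckofke/Nebula | Class 38/codewars-53.py | stock_list
-- ===== SOURCE A (Python) =====
-- def stock_list(stocklist, categories):
--     if not stocklist or not categories:
--         return ""
--     stock = {category: 0 for category in categories}
--     for book in stocklist:
--         category, amount = book.split()
--         if category[0] in stock:
--             stock[category[0]] += int(amount)
--     return " - ".join(f"({category} : {amount})" for category, amount in stock.items())
-- ===== SOURCE B (Python) =====
-- def stock_list(stocklist, categories):
--     if not stocklist or not categories:
--         return ""
--     parts = []
--     for c in dict.fromkeys(categories):
--         total = 0
--         for book in stocklist: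
--             tokens = book.split()
--             if tokens[0][0] == c:
--                 total += int(tokens[1])
--         parts.append(f"({c} : {total})")
--     return " - ".join(parts)
-- ===== Notes on version B (the rewrite author's own statement) =====
-- stated objective: alternative
-- what changed: Replaces A's single pass that maintains a mutable dict of per-letter totals by an outer loop over the deduplicated categories, each summing matching amounts in its own scan of the stocklist, with no dict at all.
import Mathlib
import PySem

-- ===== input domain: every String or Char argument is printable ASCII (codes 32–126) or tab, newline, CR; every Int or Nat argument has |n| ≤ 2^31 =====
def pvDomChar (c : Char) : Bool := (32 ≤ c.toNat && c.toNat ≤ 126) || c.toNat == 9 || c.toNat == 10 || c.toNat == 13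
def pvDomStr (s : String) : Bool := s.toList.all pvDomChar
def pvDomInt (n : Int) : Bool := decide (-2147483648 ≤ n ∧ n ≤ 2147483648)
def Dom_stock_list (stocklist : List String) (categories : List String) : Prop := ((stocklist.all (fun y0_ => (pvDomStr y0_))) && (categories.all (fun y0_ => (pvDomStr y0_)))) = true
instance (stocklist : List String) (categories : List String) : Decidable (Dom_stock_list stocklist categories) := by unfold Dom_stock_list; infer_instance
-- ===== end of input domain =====

-- B replaces A's one-pass dict accumulation by a per-category rescan of the stocklist (alternative
-- decomposition, no dict); equivalence is proved on Pre_, the inputs where A returns (no exception).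

-- ===== PORT A =====
-- loop body of A's 'for book in stocklist' (unpack, first-letter membership test, accumulate)
def stockStep (d : PySem.Dict String Int) (book : String) : PySem.Dict String Int :=
  match PySem.Str.split₀ book with
  | [category, amount] =>
      let k := ((PySem.Str.pyGet? category 0).map (fun ch => String.mk [ch])).getD ""   -- category[0]; category is a split token, nonempty
      if d.contains k then
        match PySem.Int.ofStr? amount with
        | some n => d.insert k (d.getD k 0 + n)
        | none => d        -- int(amount) raises ValueError: outside Pre_
      else d
  | _ => d                 -- unpacking raises ValueError: outside Pre_

def stock_list (stocklist : List String) (categories : List String) : String :=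
  if stocklist = [] ∨ categories = [] then ""
  else
    let stock0 : PySem.Dict String Int :=
      categories.foldl (fun d c => d.insert c 0) PySem.Dict.empty
    let stock := stocklist.foldl stockStep stock0
    PySem.Str.join " - " (stock.items.map (fun p => "(" ++ p.1 ++ " : " ++ PySem.Int.toStr p.2 ++ ")"))

-- ===== PORT B =====
-- inner loop of Source B: total for one category letter c, scanning the whole stocklist
def altTotal (stocklist : List String) (c : String) : Int :=
  stocklist.foldl (fun t book =>
    let tokens := PySem.Str.split₀ book
    if ((PySem.Str.pyGet? ((PySem.List.pyGet? tokens 0).getD "") 0).map (fun ch => String.mk [ch])).getD "" = c then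
      t + (PySem.Int.ofStr? ((PySem.List.pyGet? tokens 1).getD "")).getD 0
    else t) 0

def stock_list_alt (stocklist : List String) (categories : List String) : String :=
  if stocklist = [] ∨ categories = [] then ""
  else
    PySem.Str.join " - " ((PySem.List.dedup categories).map
      (fun c => "(" ++ c ++ " : " ++ PySem.Int.toStr (altTotal stocklist c) ++ ")"))

-- ===== PRECONDITION & SPEC =====
-- Pre_ excludes exactly the inputs on which A raises ValueError: a book that does not split into
-- exactly two tokens, or a book whose first letter is a category but whose amount int() rejects.
def Pre_stock_list (stocklist : List String) (categories : List String) : Prop :=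
  stocklist = [] ∨ categories = [] ∨
  ∀ book ∈ stocklist,
    (PySem.Str.split₀ book).length = 2 ∧
    (((PySem.Str.pyGet? ((PySem.List.pyGet? (PySem.Str.split₀ book) 0).getD "") 0).map (fun ch => String.mk [ch])).getD "" ∈ categories →
      (PySem.Int.ofStr? ((PySem.List.pyGet? (PySem.Str.split₀ book) 1).getD "")).isSome = true)
instance (stocklist : List String) (categories : List String) : Decidable (Pre_stock_list stocklist categories) := by unfold Pre_stock_list; infer_instance
def pvWitness_stock_list : List String × List String := (["ABC 3", "BOOK 10", "AXE 2"], ["A", "B"])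

def Spec_stock_list (stocklist : List String) (categories : List String) (out : String) : Prop := out = stock_list_alt stocklist categories
instance (stocklist : List String) (categories : List String) (out : String) : Decidable (Spec_stock_list stocklist categories out) := by unfold Spec_stock_list; infer_instance

-- ===== CLAIM (what is proved, stated in full; the proofs are below) =====
def Claim_equal_stock_list : Prop := ∀ (stocklist : List String) (categories : List String), Dom_stock_list stocklist categories → Pre_stock_list stocklist categories → Spec_stock_list stocklist categories (stock_list stocklist categories)

-- ===== LEMMAS AND PROOFS =====

-- first letter of a book's first token, and its parsed amount (proof-side abbreviations)
def fKey (book : String) : String :=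
  ((PySem.Str.pyGet? ((PySem.List.pyGet? (PySem.Str.split₀ book) 0).getD "") 0).map (fun ch => String.mk [ch])).getD ""
def amt (book : String) : Int :=
  (PySem.Int.ofStr? ((PySem.List.pyGet? (PySem.Str.split₀ book) 1).getD "")).getD 0
def contrib (c : String) (book : String) : Int := if fKey book = c then amt book else 0

lemma foldl_contrib (c : String) (bs : List String) (t0 : Int) :
    bs.foldl (fun t book => if fKey book = c then t + amt book else t) t0
      = t0 + (bs.map (contrib c)).sum := by
  induction bs generalizing t0 with
  | nil => simp
  | cons b rest ih =>
      simp only [List.foldl_cons, List.map_cons, List.sum_cons, ih]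
      by_cases h : fKey b = c
      · simp [contrib, h]
        ring
      · simp [contrib, h]

lemma altTotal_eq_sum (bs : List String) (c : String) :
    altTotal bs c = (bs.map (contrib c)).sum := by
  rw [show altTotal bs c
      = bs.foldl (fun t book => if fKey book = c then t + amt book else t) 0 from rfl,
    foldl_contrib]
  simp

-- evaluation of A's loop body once the two split tokens are known
lemma stockStep_eq (d : PySem.Dict String Int) (b cat a : String)
    (hs : PySem.Str.split₀ b = [cat, a]) :
    stockStep d b =
      if d.contains (((PySem.Str.pyGet? cat 0).map (fun ch => String.mk [ch])).getD "") then
        match PySem.Int.ofStr? a with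
        | some n => d.insert (((PySem.Str.pyGet? cat 0).map (fun ch => String.mk [ch])).getD "")
            (d.getD (((PySem.Str.pyGet? cat 0).map (fun ch => String.mk [ch])).getD "") 0 + n)
        | none => d
      else d := by
  unfold stockStep
  rw [hs]

-- the A loop, on books satisfying Pre_'s per-book condition, adds each book's contribution
lemma A_loop (bs : List String) (d : PySem.Dict String Int)
    (hnd : d.keys.Nodup)
    (hpre : ∀ b ∈ bs, (PySem.Str.split₀ b).length = 2 ∧
      (fKey b ∈ d.keys → (PySem.Int.ofStr? ((PySem.List.pyGet? (PySem.Str.split₀ b) 1).getD "")).isSome = true)) :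
    (bs.foldl stockStep d).items = d.items.map (fun p => (p.1, p.2 + (bs.map (contrib p.1)).sum)) := by
  induction bs generalizing d with
  | nil => simp
  | cons b rest ih =>
      obtain ⟨hlen, hint⟩ := hpre b (by simp)
      rcases hs : PySem.Str.split₀ b with _ | ⟨cat, _ | ⟨a, _ | _⟩⟩ <;> simp [hs] at hlen
      have hkey : fKey b = ((PySem.Str.pyGet? cat 0).map (fun ch => String.mk [ch])).getD "" := by
        simp [fKey, hs]
      have hamt1 : (PySem.List.pyGet? (PySem.Str.split₀ b) 1).getD "" = a := by
        rw [hs]; rfl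
      have hstep : ∀ d' : PySem.Dict String Int, d'.keys = d.keys → d'.keys.Nodup →
          (rest.foldl stockStep d').items = d'.items.map (fun p => (p.1, p.2 + (rest.map (contrib p.1)).sum)) := by
        intro d' hk hnd'
        exact ih d' hnd' (fun x hx => ⟨(hpre x (by simp [hx])).1, fun hm => (hpre x (by simp [hx])).2 (hk ▸ hm)⟩)
      rw [List.foldl_cons]
      by_cases hc : d.contains (fKey b) = true
      · have hmem : fKey b ∈ d.keys := (PySem.Dict.contains_iff_mem_keys d (fKey b)).mp hc
        obtain ⟨n, hn⟩ := Option.isSome_iff_exists.mp (hint hmem)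
        have hn' : PySem.Int.ofStr? a = some n := by rw [← hamt1]; exact hn
        have hamt : amt b = n := by simp [amt, hamt1, hn']
        have hc' : d.contains (((PySem.Str.pyGet? cat 0).map (fun ch => String.mk [ch])).getD "") = true := by
          rw [← hkey]; exact hc
        have hsb : stockStep d b = d.insert (fKey b) (d.getD (fKey b) 0 + n) := by
          rw [stockStep_eq d b cat a hs, if_pos hc', hn', ← hkey]
        have hck : (d.insert (fKey b) (d.getD (fKey b) 0 + n)).keys = d.keys :=
          PySem.Dict.keys_insert_of_contains _ _ hc
        rw [hsb, hstep _ hck (hck ▸ hnd)]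
        rw [PySem.Dict.items_insert_of_contains _ _ hc, List.map_map]
        apply List.map_congr_left
        rintro ⟨pk, pv⟩ hp
        simp only [Function.comp_apply, List.map_cons, List.sum_cons]
        by_cases hpk : pk = fKey b
        · have hbk : ((pk, pv).1 == fKey b) = true := by simpa using hpk
          have hget : d.getD (fKey b) 0 = pv := by
            have hmemit : (fKey b, pv) ∈ d.items := by rw [← hpk]; exact hp
            exact PySem.Dict.getD_of_mem_items d hmemit hnd 0
          rw [if_pos hbk, hget, hpk]
          have hcb : contrib (fKey b) b = n := by simp [contrib, hamt]
          rw [hcb]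
          exact Prod.ext rfl (by ring)
        · have hbk : ¬ ((pk, pv).1 == fKey b) = true := by simpa using hpk
          rw [if_neg hbk]
          have hcb : contrib pk b = 0 := by
            simp only [contrib]
            rw [if_neg (fun h => hpk h.symm)]
          rw [hcb]
          exact Prod.ext rfl (by ring)
      · have hc'' : ¬ d.contains (((PySem.Str.pyGet? cat 0).map (fun ch => String.mk [ch])).getD "") = true := by
          rw [← hkey]; exact hc
        have hsb : stockStep d b = d := by
          rw [stockStep_eq d b cat a hs, if_neg hc'']
        rw [hsb, hstep d rfl hnd]
        apply List.map_congr_left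
        intro p hp
        have hpk : p.1 ≠ fKey b := by
          intro h
          exact hc (h ▸ (PySem.Dict.contains_iff_mem_keys d p.1).mpr (PySem.Dict.mem_keys_of_mem_items d hp))
        simp only [List.map_cons, List.sum_cons]
        have hcb : contrib p.1 b = 0 := by
          simp only [contrib]
          rw [if_neg (fun h => hpk h.symm)]
        rw [hcb]
        exact Prod.ext rfl (by ring)

lemma stock0_getD (categories : List String) (c : String) :
    (categories.foldl (fun d c => d.insert c 0) (PySem.Dict.empty : PySem.Dict String Int)).getD c 0 = 0 := by
  suffices h : ∀ d : PySem.Dict String Int, d.getD c 0 = 0 →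
      (categories.foldl (fun d c => d.insert c 0) d).getD c 0 = 0 by
    exact h _ (by simp)
  induction categories with
  | nil => intro d h; simpa using h
  | cons x rest ih =>
      intro d h
      simp only [List.foldl_cons]
      exact ih _ (by rw [PySem.Dict.getD_insert]; split <;> simp [h])

lemma stock0_keys (categories : List String) :
    (categories.foldl (fun d c => d.insert c 0) (PySem.Dict.empty : PySem.Dict String Int)).keys
      = PySem.List.dedup categories := by
  rw [PySem.Dict.keys_foldl_insert]
  simp [PySem.Dict.keys_empty, PySem.Set.update, PySem.List.dedup_eq_ofList, PySem.Set.ofList_eq_foldl]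

lemma stock0_nodup (categories : List String) :
    (categories.foldl (fun d c => d.insert c 0) (PySem.Dict.empty : PySem.Dict String Int)).keys.Nodup :=
  PySem.Dict.nodup_keys_foldl_insert _ _ _ (by simp)

-- ===== VERDICT (by name: the statement is the Claim_ definition above) =====
theorem stock_list_spec : Claim_equal_stock_list := by
  intro stocklist categories _ hpre
  unfold Spec_stock_list stock_list stock_list_alt
  by_cases hempty : stocklist = [] ∨ categories = []
  · simp [hempty]
  · simp only [hempty, if_false]
    rcases hpre with h | h | hpre
    · exact absurd (Or.inl h) hempty
    · exact absurd (Or.inr h) hempty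
    set stock0 := categories.foldl (fun d c => d.insert c 0) (PySem.Dict.empty : PySem.Dict String Int) with hs0
    have hloop := A_loop stocklist stock0 (stock0_nodup categories)
      (fun b hb => ⟨(hpre b hb).1, fun hm => (hpre b hb).2 (by
        have := hm; rw [stock0_keys] at this
        exact (PySem.List.mem_dedup _ _).mp (by simpa [fKey] using this))⟩)
    rw [hloop]
    have hitems : stock0.items = (PySem.List.dedup categories).map (fun c => (c, (0 : Int))) := by
      rw [PySem.Dict.items_eq_map_keys stock0 (stock0_nodup categories) 0, stock0_keys]
      exact List.map_congr_left (fun c _ => by rw [stock0_getD])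
    rw [hitems, List.map_map, List.map_map]
    congr 1
    apply List.map_congr_left
    intro c _
    simp [Function.comp, altTotal_eq_sum]
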